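-- pv_equiv track=rewrite | github.com/dimuthukag/po-extractor | po_formats/po_type_3.py | __getSizeRange
-- ===== SOURCE A (Python) =====
-- def __getSizeRange(currentSizes:str,newSizes:str=None)->str:
--     """
--         Returns the size range
--     """
--     sizeWeightDict = {
--         '6XS':-7,
--         '5XS':-6,
--         '4XS':-5,
--         '3XS':-4,
--         '2XS':-3,
--         'XS':-2,
--         'S':-1,
--         'M':0,
--         'L':1,
--         'XL':2,
--         '2XL':3,
--         '3XL':4,
--         '4XL':5,
--         '5XL':6,
--         '6XL':7,
--     }
--
--     if newSizes==None:
--         sizeList = set(str(currentSizes).split(" - "))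
--     elif newSizes!=None:
--         sizeList = set(str(currentSizes).split(" - ") + str(newSizes).split(" "))
--     try:
--         sizeDict = {size : sizeWeightDict[size] for size in sizeList}
--         sortedSizeList = sorted(sizeDict.items(), key=lambda x:x[1])
--         if len(sortedSizeList)==1:
--             return f"{sortedSizeList[0][0]}"
--         elif len(sortedSizeList)>1:
--             return f"{sortedSizeList[0][0]} - {sortedSizeList[-1][0]}"
--
--     except KeyError:
--         if newSizes==None:
--             sizeList = list(set(str(currentSizes).split(" - ")))
--         elif newSizes!=None:
--             sizeList = list(set(str(currentSizes).split(" - ") + str(newSizes).split(" ")))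
--         try:
--             sizeList = [int(size) for size in sizeList]
--             sizeList = sorted(sizeList)
--             if len(sizeList)==1:
--                 return sizeList[0]
--             elif len(sizeList)>1:
--                 return f"{sizeList[0]} - {sizeList[-1]}"
--         except IndexError:
--             return "-"
-- ===== SOURCE B (Python) =====
-- def __getSizeRange(currentSizes:str,newSizes:str=None)->str:
--     sizeWeightDict = {
--         '6XS':-7, '5XS':-6, '4XS':-5, '3XS':-4, '2XS':-3, 'XS':-2, 'S':-1,
--         'M':0, 'L':1, 'XL':2, '2XL':3, '3XL':4, '4XL':5, '5XL':6, '6XL':7,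
--     }
--     parts = str(currentSizes).split(" - ")
--     if newSizes is not None:
--         parts += str(newSizes).split(" ")
--     sizes = set(parts)
--     if all(s in sizeWeightDict for s in sizes):
--         lo = min(sizes, key=sizeWeightDict.get)
--         hi = max(sizes, key=sizeWeightDict.get)
--         return lo if len(sizes) == 1 else f"{lo} - {hi}"
--     vals = [int(s) for s in sizes]
--     lo, hi = min(vals), max(vals)
--     return lo if len(vals) == 1 else f"{lo} - {hi}"
-- ===== Notes on version B (the rewrite author's own statement) =====
-- stated objective: simpler
-- what changed: Replaces the try/except-KeyError dict-comprehension plus full sort in each branch with an explicit all-keys membership test and single-pass min()/max() scans, so no intermediate dict of weights and no sorted list are built.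
-- outside the precondition, e.g. on __getSizeRange('7', None): A returns 7, B returns 7
import Mathlib
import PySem

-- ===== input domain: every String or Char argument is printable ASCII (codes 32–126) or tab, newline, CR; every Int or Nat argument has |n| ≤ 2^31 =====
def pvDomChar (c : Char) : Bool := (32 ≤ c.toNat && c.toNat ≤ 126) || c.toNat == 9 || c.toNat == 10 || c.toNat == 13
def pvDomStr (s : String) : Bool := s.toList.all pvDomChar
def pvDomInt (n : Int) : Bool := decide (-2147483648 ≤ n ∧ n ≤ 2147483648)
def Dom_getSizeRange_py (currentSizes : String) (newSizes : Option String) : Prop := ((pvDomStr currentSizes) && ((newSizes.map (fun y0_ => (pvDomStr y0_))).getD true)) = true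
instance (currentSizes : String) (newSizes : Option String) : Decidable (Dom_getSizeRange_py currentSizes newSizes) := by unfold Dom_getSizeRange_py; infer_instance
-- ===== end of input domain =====

-- B: replaces the try/except-KeyError dict build + full sort of A with an explicit
-- membership test and single-pass min/max scans (objective: simpler).


-- ===== PORT A =====
-- str.split with a nonempty literal separator: split? is none only for sep = ""
def pvSplitDash (s : String) : List String := (PySem.Str.split? s " - ").getD []
def pvSplitSpace (s : String) : List String := (PySem.Str.split? s " ").getD []
-- the module's sizeWeightDict constant (shared by both ports)
def pvWeights : PySem.Dict String Int := PySem.Dict.ofList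
  [("6XS", -7), ("5XS", -6), ("4XS", -5), ("3XS", -4), ("2XS", -3), ("XS", -2), ("S", -1),
   ("M", 0), ("L", 1), ("XL", 2), ("2XL", 3), ("3XL", 4), ("4XL", 5), ("5XL", 6), ("6XL", 7)]

-- A's dict comprehension {size: sizeWeightDict[size] for size in sizeList}; none = KeyError
def pvBuildSizeDict : List String → PySem.Dict String Int → Option (PySem.Dict String Int)
  | [], acc => some acc
  | s :: rest, acc =>
      match pvWeights.get? s with
      | none => none
      | some w => pvBuildSizeDict rest (acc.insert s w)

-- A's [int(size) for size in sizeList]; none = ValueError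
def pvMapInt : List String → Option (List Int)
  | [] => some []
  | s :: rest =>
      match PySem.Int.ofStr? s with
      | none => none
      | some n => (pvMapInt rest).map (n :: ·)

-- port of A; `none` encodes: A raises (KeyError then ValueError) or returns a bare int
-- (the single-int fallback branch), both outside Pre_
def getSizeRange_py (currentSizes : String) (newSizes : Option String) : Option String :=
  let sizeList : List String :=
    match newSizes with
    | none => PySem.Set.ofList (pvSplitDash currentSizes)
    | some ns => PySem.Set.ofList (pvSplitDash currentSizes ++ pvSplitSpace ns)
  match pvBuildSizeDict sizeList PySem.Dict.empty with
  | some sizeDict =>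
      let sortedSizeList := PySem.List.sorted sizeDict.items (fun x => x.2)
      if sortedSizeList.length == 1 then
        (PySem.List.pyGet? sortedSizeList 0).map (fun p => p.1)
      else if sortedSizeList.length > 1 then
        match PySem.List.pyGet? sortedSizeList 0, PySem.List.pyGet? sortedSizeList (-1) with
        | some f, some l => some (PySem.Str.join " - " [f.1, l.1])
        | _, _ => none
      else none
  | none =>
      -- except KeyError: recompute the size list, int path
      let sizeList2 : List String :=
        match newSizes with
        | none => PySem.Set.ofList (pvSplitDash currentSizes)
        | some ns => PySem.Set.ofList (pvSplitDash currentSizes ++ pvSplitSpace ns)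
      match pvMapInt sizeList2 with
      | some ints =>
          let s := PySem.List.sorted ints (fun x => x)
          if s.length == 1 then none  -- Python returns an int here, not a str: excluded by Pre_
          else if s.length > 1 then
            match PySem.List.pyGet? s 0, PySem.List.pyGet? s (-1) with
            | some f, some l => some (PySem.Str.join " - " [PySem.Int.toStr f, PySem.Int.toStr l])
            | _, _ => none
          else none
      | none => none  -- ValueError propagates: excluded by Pre_

-- ===== PORT B =====
def getSizeRange_py_alt (currentSizes : String) (newSizes : Option String) : Option String :=
  let parts : List String := pvSplitDash currentSizes ++ newSizes.elim [] pvSplitSpace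
  let sizes : PySem.Set String := PySem.Set.ofList parts
  if sizes.all (fun s => pvWeights.contains s) then
    (PySem.List.min? sizes (fun s => pvWeights.getD s 0)).bind fun lo =>
      (PySem.List.max? sizes (fun s => pvWeights.getD s 0)).bind fun hi =>
        if PySem.Set.len sizes == 1 then some lo
        else some (PySem.Str.join " - " [lo, hi])
  else
    (sizes.mapM PySem.Int.ofStr?).bind fun vals =>
      (PySem.List.min? vals (fun z => z)).bind fun lo =>
        (PySem.List.max? vals (fun z => z)).bind fun hi =>
          if vals.length == 1 then none  -- Python returns the bare int lo here: excluded by Pre_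
          else some (PySem.Str.join " - " [PySem.Int.toStr lo, PySem.Int.toStr hi])
  -- ValueError from int() propagates in Python where mapM is none: excluded by Pre_

-- ===== PRECONDITION & SPEC =====
-- Pre_ excludes inputs whose size set contains a non-weight-key, non-int string (A raises
-- ValueError there) and all-int size sets with a single distinct element (A returns a bare
-- int there, not a value of the declared str type).
def Pre_getSizeRange_py (currentSizes : String) (newSizes : Option String) : Prop :=
  let parts : List String :=
    pvSplitDash currentSizes ++
      (match newSizes with
       | some ns => pvSplitSpace ns
       | none => [])
  (∀ s ∈ parts, pvWeights.contains s = true) ∨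
  ((∀ s ∈ parts, (PySem.Int.ofStr? s).isSome = true) ∧
    2 ≤ (PySem.Set.ofList parts).length)
instance (currentSizes : String) (newSizes : Option String) : Decidable (Pre_getSizeRange_py currentSizes newSizes) := by unfold Pre_getSizeRange_py; infer_instance

def pvWitness_getSizeRange_py : String × Option String := ("S - XL", some "2XL M")

def Spec_getSizeRange_py (currentSizes : String) (newSizes : Option String) (out : Option String) : Prop := out = getSizeRange_py_alt currentSizes newSizes
instance (currentSizes : String) (newSizes : Option String) (out : Option String) : Decidable (Spec_getSizeRange_py currentSizes newSizes out) := by unfold Spec_getSizeRange_py; infer_instance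

-- ===== CLAIM (what is proved, stated in full; the proofs are below) =====
def Claim_equal_getSizeRange_py : Prop := ∀ (currentSizes : String) (newSizes : Option String), Dom_getSizeRange_py currentSizes newSizes → Pre_getSizeRange_py currentSizes newSizes → Spec_getSizeRange_py currentSizes newSizes (getSizeRange_py currentSizes newSizes)

-- ===== LEMMAS AND PROOFS =====

-- xs[0] is the head
theorem pv_pyGet_zero {a : Type} (xs : List a) : PySem.List.pyGet? xs 0 = xs.head? := by
  simp [PySem.List.pyGet?, PySem.List.pyIdx?]
  cases xs <;> simp

-- xs[-1] is the last element
theorem pv_pyGet_neg_one {a : Type} (xs : List a) : PySem.List.pyGet? xs (-1) = xs.getLast? := by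
  simp [PySem.List.pyGet?, PySem.List.pyIdx?]
  cases xs with
  | nil => simp
  | cons x t => simp [List.getLast?_eq_getElem?]

-- in a key-sorted list the last element has maximal key
theorem pv_pairwise_getLast {a : Type} {key : a → Int} :
    ∀ {l : List a}, l.Pairwise (fun x y => key x ≤ key y) → ∀ {m : a}, l.getLast? = some m →
      ∀ y ∈ l, key y ≤ key m
  | [], _, _, hm => by simp at hm
  | x :: t, h, m, hm => by
    intro y hy
    cases t with
    | nil =>
      simp at hm hy
      subst hm; subst hy; exact le_refl _
    | cons b t' =>
      have hm' : (b :: t').getLast? = some m := by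
        rw [List.getLast?_cons_cons] at hm; exact hm
      have hmem : m ∈ b :: t' := List.mem_of_getLast? hm'
      rcases List.mem_cons.mp hy with rfl | hy'
      · exact (List.pairwise_cons.mp h).1 m hmem
      · exact pv_pairwise_getLast (List.pairwise_cons.mp h).2 hm' y hy'

-- head of a stable key-sort = min(l, key) when the key is injective on l
theorem pv_sorted_head {a : Type} (l : List a) (key : a → Int)
    (hinj : ∀ x ∈ l, ∀ y ∈ l, key x = key y → x = y) :
    (PySem.List.sorted l key).head? = PySem.List.min? l key := by
  cases hs : PySem.List.sorted l key with
  | nil =>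
    have hnil : l = [] := (PySem.List.sorted_eq_nil_iff l key false).mp hs
    subst hnil
    simp [(PySem.List.min?_eq_none_iff ([] : List a) key).mpr rfl]
  | cons m t =>
    have hmmem : m ∈ l := (PySem.List.mem_sorted l key false m).mp (hs ▸ List.mem_cons_self ..)
    have hmin : ∀ y ∈ l, key m ≤ key y := PySem.List.key_head_sorted_le l key hs
    cases hmin? : PySem.List.min? l key with
    | none =>
      have : l = [] := (PySem.List.min?_eq_none_iff l key).mp hmin?
      subst this; simp at hmmem
    | some m0 =>
      have h1 := PySem.List.min?_isMin hmin? m hmmem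
      have h2 := hmin m0 (PySem.List.min?_mem hmin?)
      simp [hinj m hmmem m0 (PySem.List.min?_mem hmin?) (le_antisymm h2 h1)]

-- last of a stable key-sort = max(l, key) when the key is injective on l
theorem pv_sorted_last {a : Type} (l : List a) (key : a → Int)
    (hinj : ∀ x ∈ l, ∀ y ∈ l, key x = key y → x = y) :
    (PySem.List.sorted l key).getLast? = PySem.List.max? l key := by
  cases hl : (PySem.List.sorted l key).getLast? with
  | none =>
    have hnil : l = [] := by
      have := List.getLast?_eq_none_iff.mp hl
      exact (PySem.List.sorted_eq_nil_iff l key false).mp this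
    subst hnil
    simp [(PySem.List.max?_eq_none_iff ([] : List a) key).mpr rfl]
  | some m =>
    have hmmem : m ∈ l :=
      (PySem.List.mem_sorted l key false m).mp (List.mem_of_getLast? hl)
    have hmax : ∀ y ∈ l, key y ≤ key m := by
      intro y hy
      exact pv_pairwise_getLast (PySem.List.sorted_pairwise l key) hl y
        ((PySem.List.mem_sorted l key false y).mpr hy)
    cases hmax? : PySem.List.max? l key with
    | none =>
      have : l = [] := (PySem.List.max?_eq_none_iff l key).mp hmax?
      subst this; simp at hmmem
    | some m0 =>
      have h1 := PySem.List.max?_isMax hmax? m hmmem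
      have h2 := hmax m0 (PySem.List.max?_mem hmax?)
      simp [hinj m hmmem m0 (PySem.List.max?_mem hmax?) (le_antisymm h1 h2)]

-- min over the (s, f s) pair list, projected, = min over the underlying list
theorem pv_min_map {a : Type} (l : List a) (f : a → Int)
    (hinj : ∀ x ∈ l, ∀ y ∈ l, f x = f y → x = y) :
    (PySem.List.min? (l.map fun s => (s, f s)) (fun x => x.2)).map (fun p => p.1) =
      PySem.List.min? l f := by
  cases h1 : PySem.List.min? (l.map fun s => (s, f s)) (fun x => x.2) with
  | none =>
    have : l = [] := by
      have := (PySem.List.min?_eq_none_iff _ _).mp h1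
      simpa using this
    subst this
    simp [(PySem.List.min?_eq_none_iff ([] : List a) f).mpr rfl]
  | some p =>
    obtain ⟨x, hx, rfl⟩ := List.mem_map.mp (PySem.List.min?_mem h1)
    cases h2 : PySem.List.min? l f with
    | none =>
      have : l = [] := (PySem.List.min?_eq_none_iff l f).mp h2
      subst this; simp at hx
    | some lo =>
      have hlo := PySem.List.min?_mem h2
      have ha := PySem.List.min?_isMin h1 (lo, f lo) (List.mem_map.mpr ⟨lo, hlo, rfl⟩)
      have hb := PySem.List.min?_isMin h2 x hx
      simp [hinj x hx lo hlo (le_antisymm ha hb)]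

-- max over the (s, f s) pair list, projected, = max over the underlying list
theorem pv_max_map {a : Type} (l : List a) (f : a → Int)
    (hinj : ∀ x ∈ l, ∀ y ∈ l, f x = f y → x = y) :
    (PySem.List.max? (l.map fun s => (s, f s)) (fun x => x.2)).map (fun p => p.1) =
      PySem.List.max? l f := by
  cases h1 : PySem.List.max? (l.map fun s => (s, f s)) (fun x => x.2) with
  | none =>
    have : l = [] := by
      have := (PySem.List.max?_eq_none_iff _ _).mp h1
      simpa using this
    subst this
    simp [(PySem.List.max?_eq_none_iff ([] : List a) f).mpr rfl]
  | some p =>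
    obtain ⟨x, hx, rfl⟩ := List.mem_map.mp (PySem.List.max?_mem h1)
    cases h2 : PySem.List.max? l f with
    | none =>
      have : l = [] := (PySem.List.max?_eq_none_iff l f).mp h2
      subst this; simp at hx
    | some hi =>
      have hhi := PySem.List.max?_mem h2
      have ha := PySem.List.max?_isMax h1 (hi, f hi) (List.mem_map.mpr ⟨hi, hhi, rfl⟩)
      have hb := PySem.List.max?_isMax h2 x hx
      simp [hinj x hx hi hhi (le_antisymm hb ha)]

-- inverse of the weight table, for injectivity of the weight key
def pvUnweigh (w : Int) : String :=
  if w = -7 then "6XS" else if w = -6 then "5XS" else if w = -5 then "4XS"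
  else if w = -4 then "3XS" else if w = -3 then "2XS" else if w = -2 then "XS"
  else if w = -1 then "S" else if w = 0 then "M" else if w = 1 then "L"
  else if w = 2 then "XL" else if w = 3 then "2XL" else if w = 4 then "3XL"
  else if w = 5 then "4XL" else if w = 6 then "5XL" else "6XL"

theorem pv_contains_elim {s : String} (h : pvWeights.contains s = true) :
    s ∈ ["6XS", "5XS", "4XS", "3XS", "2XS", "XS", "S", "M", "L", "XL", "2XL", "3XL", "4XL", "5XL", "6XL"] := by
  rw [PySem.Dict.contains_eq_decide_mem_keys] at h
  have h2 : s ∈ pvWeights.keys := of_decide_eq_true h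
  have hk : pvWeights.keys = ["6XS", "5XS", "4XS", "3XS", "2XS", "XS", "S", "M", "L", "XL", "2XL", "3XL", "4XL", "5XL", "6XL"] := by decide
  rw [hk] at h2
  exact h2

theorem pv_unweigh_getD {s : String} (h : pvWeights.contains s = true) :
    pvUnweigh (pvWeights.getD s 0) = s := by
  have h2 := pv_contains_elim h
  simp only [List.mem_cons, List.not_mem_nil, or_false] at h2
  rcases h2 with rfl | rfl | rfl | rfl | rfl | rfl | rfl | rfl | rfl | rfl | rfl | rfl | rfl | rfl | rfl <;> decide

theorem pv_f_inj {x y : String} (hx : pvWeights.contains x = true) (hy : pvWeights.contains y = true)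
    (h : pvWeights.getD x 0 = pvWeights.getD y 0) : x = y := by
  rw [← pv_unweigh_getD hx, h, pv_unweigh_getD hy]

-- the dict comprehension succeeds and lists the pairs in order when all keys are present
theorem pv_build_some : ∀ (xs : List String) (acc : PySem.Dict String Int), xs.Nodup →
    (∀ s ∈ xs, pvWeights.contains s = true) → (∀ s ∈ xs, acc.contains s = false) →
    ∃ d, pvBuildSizeDict xs acc = some d ∧
      d.items = acc.items ++ xs.map (fun s => (s, pvWeights.getD s 0))
  | [], acc, _, _, _ => ⟨acc, rfl, by simp⟩
  | s :: rest, acc, hnd, hall, hdis => by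
    have hc : pvWeights.contains s = true := hall s List.mem_cons_self
    rw [PySem.Dict.contains_eq_isSome_get?] at hc
    obtain ⟨w, hw⟩ := Option.isSome_iff_exists.mp hc
    have hgd : pvWeights.getD s 0 = w := PySem.Dict.getD_of_get?_eq_some _ _ hw
    obtain ⟨d, hd, hitems⟩ := pv_build_some rest (acc.insert s w) (List.nodup_cons.mp hnd).2
      (fun t ht => hall t (List.mem_cons_of_mem _ ht))
      (fun t ht => by
        rw [PySem.Dict.contains_insert]
        have hts : t ≠ s := fun he => (List.nodup_cons.mp hnd).1 (he ▸ ht)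
        simp [hts, hdis t (List.mem_cons_of_mem _ ht)])
    refine ⟨d, ?_, ?_⟩
    · simp only [pvBuildSizeDict, hw]; exact hd
    · rw [hitems, PySem.Dict.items_insert_of_not_contains _ _ (hdis s List.mem_cons_self)]
      simp [hgd]

-- the dict comprehension raises KeyError when some size is not a weight key
theorem pv_build_none : ∀ (xs : List String) (acc : PySem.Dict String Int),
    (∃ s ∈ xs, pvWeights.contains s = false) → pvBuildSizeDict xs acc = none
  | [], _, h => by simp at h
  | s :: rest, acc, h => by
    simp only [pvBuildSizeDict]
    cases hw : pvWeights.get? s with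
    | none => rfl
    | some w =>
      have hcs : pvWeights.contains s = true := by
        rw [PySem.Dict.contains_eq_isSome_get?, hw]; rfl
      obtain ⟨t, ht, hct⟩ := h
      rcases List.mem_cons.mp ht with rfl | ht'
      · rw [hcs] at hct; cases hct
      · exact pv_build_none rest _ ⟨t, ht', hct⟩

-- A's recursive int comprehension is B's mapM
theorem pv_mapInt_eq : ∀ xs : List String, pvMapInt xs = xs.mapM PySem.Int.ofStr?
  | [] => rfl
  | s :: rest => by
    simp only [pvMapInt, List.mapM_cons, pv_mapInt_eq rest]
    cases PySem.Int.ofStr? s <;> cases rest.mapM PySem.Int.ofStr? <;> simp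

theorem pv_mapInt_some : ∀ (xs : List String),
    (∀ s ∈ xs, (PySem.Int.ofStr? s).isSome = true) →
    ∃ vals, pvMapInt xs = some vals ∧ vals.length = xs.length
  | [], _ => ⟨[], rfl, rfl⟩
  | s :: rest, h => by
    obtain ⟨n, hn⟩ := Option.isSome_iff_exists.mp (h s List.mem_cons_self)
    obtain ⟨vals, hv, hl⟩ := pv_mapInt_some rest (fun t ht => h t (List.mem_cons_of_mem _ ht))
    exact ⟨n :: vals, by simp [pvMapInt, hn, hv], by simp [hl]⟩

theorem pv_set_len {a : Type} (l : PySem.Set a) : PySem.Set.len l = (l.length : Int) := by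
  simp [PySem.Set.len]


-- the two bodies agree, stated over the deduplicated size list
theorem pv_core (sizes : List String) (hnd : sizes.Nodup)
    (hpre : (∀ s ∈ sizes, pvWeights.contains s = true) ∨
            ((∀ s ∈ sizes, (PySem.Int.ofStr? s).isSome = true) ∧ 2 ≤ sizes.length)) :
    (match pvBuildSizeDict sizes PySem.Dict.empty with
     | some sizeDict =>
        if (PySem.List.sorted sizeDict.items (fun x => x.2)).length == 1 then
          (PySem.List.pyGet? (PySem.List.sorted sizeDict.items (fun x => x.2)) 0).map (fun p => p.1)
        else if (PySem.List.sorted sizeDict.items (fun x => x.2)).length > 1 then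
          match PySem.List.pyGet? (PySem.List.sorted sizeDict.items (fun x => x.2)) 0,
                PySem.List.pyGet? (PySem.List.sorted sizeDict.items (fun x => x.2)) (-1) with
          | some f, some l => some (PySem.Str.join " - " [f.1, l.1])
          | _, _ => none
        else none
     | none =>
        match pvMapInt sizes with
        | some ints =>
            if (PySem.List.sorted ints (fun x => x)).length == 1 then none
            else if (PySem.List.sorted ints (fun x => x)).length > 1 then
              match PySem.List.pyGet? (PySem.List.sorted ints (fun x => x)) 0,
                    PySem.List.pyGet? (PySem.List.sorted ints (fun x => x)) (-1) with
              | some f, some l => some (PySem.Str.join " - " [PySem.Int.toStr f, PySem.Int.toStr l])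
              | _, _ => none
            else none
        | none => none)
    =
    (if sizes.all (fun s => pvWeights.contains s) then
      (PySem.List.min? sizes (fun s => pvWeights.getD s 0)).bind fun lo =>
        (PySem.List.max? sizes (fun s => pvWeights.getD s 0)).bind fun hi =>
          if PySem.Set.len sizes == 1 then some lo
          else some (PySem.Str.join " - " [lo, hi])
    else
      (sizes.mapM PySem.Int.ofStr?).bind fun vals =>
        (PySem.List.min? vals (fun z => z)).bind fun lo =>
          (PySem.List.max? vals (fun z => z)).bind fun hi =>
            if vals.length == 1 then none
            else some (PySem.Str.join " - " [PySem.Int.toStr lo, PySem.Int.toStr hi])) := by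
  by_cases hall : ∀ s ∈ sizes, pvWeights.contains s = true
  · -- weight path
    obtain ⟨d, hd, hitems⟩ := pv_build_some sizes PySem.Dict.empty hnd hall
      (fun s _ => by rfl)
    have hitems' : d.items = sizes.map (fun s => (s, pvWeights.getD s 0)) := by
      rw [hitems]; rfl
    rw [hd, if_pos (List.all_eq_true.mpr hall)]
    dsimp only
    have hinjs : ∀ x ∈ sizes, ∀ y ∈ sizes, pvWeights.getD x 0 = pvWeights.getD y 0 → x = y :=
      fun x hx y hy h => pv_f_inj (hall x hx) (hall y hy) h
    have hinjp : ∀ p ∈ sizes.map (fun s => (s, pvWeights.getD s 0)),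
        ∀ q ∈ sizes.map (fun s => (s, pvWeights.getD s 0)),
        (fun x : String × Int => x.2) p = (fun x : String × Int => x.2) q → p = q := by
      intro p hp q hq h
      obtain ⟨x, hx, rfl⟩ := List.mem_map.mp hp
      obtain ⟨y, hy, rfl⟩ := List.mem_map.mp hq
      have := hinjs x hx y hy h
      subst this; rfl
    have hhead : (PySem.List.sorted d.items (fun x => x.2)).head?.map (fun p => p.1)
        = PySem.List.min? sizes (fun s => pvWeights.getD s 0) := by
      rw [hitems', pv_sorted_head _ _ hinjp, pv_min_map _ _ hinjs]
    have hlast : (PySem.List.sorted d.items (fun x => x.2)).getLast?.map (fun p => p.1)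
        = PySem.List.max? sizes (fun s => pvWeights.getD s 0) := by
      rw [hitems', pv_sorted_last _ _ hinjp, pv_max_map _ _ hinjs]
    have hlen : (PySem.List.sorted d.items (fun x => x.2)).length = sizes.length := by
      rw [PySem.List.length_sorted, hitems', List.length_map]
    cases hm : PySem.List.min? sizes (fun s => pvWeights.getD s 0) with
    | none =>
      have hnil : sizes = [] := (PySem.List.min?_eq_none_iff _ _).mp hm
      subst hnil
      have h0 : (PySem.List.sorted d.items (fun x => x.2)).length = 0 := by rw [hlen]; rfl
      simp [h0]
    | some lo =>
      have hne : sizes ≠ [] := by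
        intro h; rw [(PySem.List.min?_eq_none_iff _ _).mpr h] at hm; cases hm
      cases hM : PySem.List.max? sizes (fun s => pvWeights.getD s 0) with
      | none => exact absurd ((PySem.List.max?_eq_none_iff _ _).mp hM) hne
      | some hi =>
        obtain ⟨p, hp, hp1⟩ := Option.map_eq_some_iff.mp (hhead.trans hm)
        obtain ⟨q, hq, hq1⟩ := Option.map_eq_some_iff.mp (hlast.trans hM)
        simp only [Option.bind_some]
        by_cases h1 : sizes.length = 1
        · have hA : ((PySem.List.sorted d.items (fun x => x.2)).length == 1) = true := by
            rw [hlen, h1]; rfl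
          have hB : (PySem.Set.len sizes == 1) = true := by
            rw [pv_set_len, h1]; rfl
          rw [if_pos hA, if_pos hB, pv_pyGet_zero, hp]
          simp [hp1]
        · have hpos : 0 < sizes.length := List.length_pos_iff.mpr hne
          have h2 : 1 < sizes.length := by omega
          have hA1 : ((PySem.List.sorted d.items (fun x => x.2)).length == 1) = false := by
            rw [hlen]; simp; omega
          have hB1 : (PySem.Set.len sizes == 1) = false := by
            rw [pv_set_len]; simp; omega
          rw [if_neg (ne_true_of_eq_false hA1), if_pos (show 1 < _ by rw [hlen]; exact h2),
              pv_pyGet_zero, pv_pyGet_neg_one, hp, hq, if_neg (ne_true_of_eq_false hB1)]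
          dsimp only
          rw [hp1, hq1]
  · -- int path
    rcases hpre with h | ⟨hint, hlen2⟩
    · exact absurd h hall
    push Not at hall
    obtain ⟨s0, hs0, hc0⟩ := hall
    have hc0' : pvWeights.contains s0 = false := by
      cases h : pvWeights.contains s0
      · rfl
      · exact absurd h hc0
    rw [pv_build_none sizes _ ⟨s0, hs0, hc0'⟩]
    have hba : sizes.all (fun s => pvWeights.contains s) = false :=
      List.all_eq_false.mpr ⟨s0, hs0, by simp [hc0']⟩
    rw [if_neg (by simp [hba])]
    obtain ⟨vals, hv, hvl⟩ := pv_mapInt_some sizes hint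
    rw [hv, ← pv_mapInt_eq, hv]
    simp only [Option.bind_some]
    have hvl2 : 2 ≤ vals.length := by omega
    have hne : vals ≠ [] := by intro h; subst h; simp at hvl2
    have hinj : ∀ x ∈ vals, ∀ y ∈ vals, (fun z : Int => z) x = (fun z : Int => z) y → x = y :=
      fun x _ y _ h => h
    have hhead := pv_sorted_head vals (fun z => z) hinj
    have hlast := pv_sorted_last vals (fun z => z) hinj
    have hlen : (PySem.List.sorted vals (fun z => z)).length = vals.length :=
      PySem.List.length_sorted _ _ _
    cases hm : PySem.List.min? vals (fun z => z) with
    | none => exact absurd ((PySem.List.min?_eq_none_iff _ _).mp hm) hne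
    | some lo =>
      cases hM : PySem.List.max? vals (fun z => z) with
      | none => exact absurd ((PySem.List.max?_eq_none_iff _ _).mp hM) hne
      | some hi =>
        simp only [Option.bind_some]
        have hA1 : ((PySem.List.sorted vals (fun z => z)).length == 1) = false := by
          rw [hlen]; simp; omega
        have hB1 : (vals.length == 1) = false := by simp; omega
        rw [if_neg (ne_true_of_eq_false hA1), if_pos (show 1 < _ by rw [hlen]; omega),
            pv_pyGet_zero, pv_pyGet_neg_one, hhead, hlast, hm, hM, if_neg (ne_true_of_eq_false hB1)]

-- ===== VERDICT (by name: the statement is the Claim_ definition above) =====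
theorem getSizeRange_py_spec : Claim_equal_getSizeRange_py := by
  intro cs ns hdom hpre
  unfold Spec_getSizeRange_py getSizeRange_py getSizeRange_py_alt
  unfold Pre_getSizeRange_py at hpre
  cases ns with
  | none =>
    simp only [Option.elim] at hpre ⊢
    simp only [List.append_nil] at hpre ⊢
    refine pv_core _ (PySem.Set.nodup_ofList _) ?_
    refine hpre.imp (fun h s hs => h s ((PySem.Set.mem_ofList _ _).mp hs)) ?_
    rintro ⟨h, hl⟩
    exact ⟨fun s hs => h s ((PySem.Set.mem_ofList _ _).mp hs), hl⟩
  | some n =>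
    dsimp only at hpre ⊢
    refine pv_core _ (PySem.Set.nodup_ofList _) ?_
    refine hpre.imp (fun h s hs => h s ((PySem.Set.mem_ofList _ _).mp hs)) ?_
    rintro ⟨h, hl⟩
    exact ⟨fun s hs => h s ((PySem.Set.mem_ofList _ _).mp hs), hl⟩
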